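-- pv_equiv track=rewrite | github.com/Bandi120424/Algorithm_Python | 백준/Silver/2531. 회전 초밥/회전 초밥.py | eat_serial_dishes
-- ===== SOURCE A (Python) =====
-- def count_unique_dish(dishes, coupon_num):
--     if coupon_num not in dishes:
--         return len(set(dishes))+1
--     return len(set(dishes))
--
-- def eat_serial_dishes(belt, total_dish, dishes_to_eat, coupon_num):  # 연속한 접시들의 초밥 종류를 카운트
--     max_dish = 0
--     for dish_idx in range(total_dish):
--         end = dish_idx + dishes_to_eat
--
--         if end > total_dish - 1:
--             end %= total_dish
--             dishes = belt[dish_idx:]+belt[:end]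
--         else:
--             dishes = belt[dish_idx: end]
--
--         max_dish = max(max_dish, count_unique_dish(dishes, coupon_num))
--
--     return max_dish
-- ===== SOURCE B (Python) =====
-- def eat_serial_dishes(belt, total_dish, dishes_to_eat, coupon_num):
--     best = 0
--     for i in range(total_dish):
--         end = i + dishes_to_eat
--         if end > total_dish - 1:
--             window = belt[i:] + belt[:end % total_dish]
--         else:
--             window = belt[i:end]
--         # count the kinds by sorting the window and counting adjacency changes
--         kinds = 0
--         has_coupon = False
--         prev = None
--         for x in sorted(window):
--             if kinds == 0 or x != prev:
--                 kinds += 1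
--                 prev = x
--             if x == coupon_num:
--                 has_coupon = True
--         score = kinds if has_coupon else kinds + 1
--         if score > best:
--             best = score
--     return best
-- ===== Notes on version B (the rewrite author's own statement) =====
-- stated objective: alternative
-- what changed: B counts the kinds in each window by sorting the window and counting adjacency changes (and spotting the coupon dish) in a single scan, instead of A's building a hash set per window plus a separate membership test; the window enumeration itself is unchanged.
import Mathlib
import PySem

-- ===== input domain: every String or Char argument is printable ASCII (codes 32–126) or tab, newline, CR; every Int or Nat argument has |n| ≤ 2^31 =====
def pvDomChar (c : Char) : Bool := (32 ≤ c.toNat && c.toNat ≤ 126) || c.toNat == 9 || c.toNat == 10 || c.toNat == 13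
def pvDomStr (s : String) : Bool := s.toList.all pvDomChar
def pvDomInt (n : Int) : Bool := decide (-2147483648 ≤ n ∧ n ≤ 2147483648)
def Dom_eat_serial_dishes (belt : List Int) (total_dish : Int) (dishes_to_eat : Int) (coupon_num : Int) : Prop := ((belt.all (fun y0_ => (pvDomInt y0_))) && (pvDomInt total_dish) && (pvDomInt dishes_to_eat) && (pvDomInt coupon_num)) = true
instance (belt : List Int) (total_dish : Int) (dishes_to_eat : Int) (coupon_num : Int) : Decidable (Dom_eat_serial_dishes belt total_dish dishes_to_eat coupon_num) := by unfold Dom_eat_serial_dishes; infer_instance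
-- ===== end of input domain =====

-- B counts the kinds on each window by sorting it and counting adjacency changes in one scan,
-- instead of A's hash set plus a separate membership test (objective: alternative).

-- ===== PORT A =====
def count_unique_dish (dishes : List Int) (coupon_num : Int) : Int :=
  if coupon_num ∉ dishes then ((PySem.Set.ofList dishes).length : Int) + 1
  else ((PySem.Set.ofList dishes).length : Int)

def eat_serial_dishes (belt : List Int) (total_dish : Int) (dishes_to_eat : Int) (coupon_num : Int) : Int :=
  (PySem.List.pyRange 0 total_dish 1).foldl (fun max_dish dish_idx =>
    let e := dish_idx + dishes_to_eat
    let dishes :=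
      if e > total_dish - 1 then
        PySem.List.slice belt (some dish_idx) none ++
          PySem.List.slice belt none (some (PySem.Int.mod e total_dish))
      else
        PySem.List.slice belt (some dish_idx) (some e)
    max max_dish (count_unique_dish dishes coupon_num)) 0

-- ===== PORT B =====
-- inner-scan body: one element of the sorted window (state: kinds, has_coupon, prev)
def scanStep (coupon_num : Int) (st : Int × Bool × Option Int) (x : Int) : Int × Bool × Option Int :=
  let st1 := if st.1 = 0 ∨ some x ≠ st.2.2 then (st.1 + 1, st.2.1, some x) else st
  if x = coupon_num then (st1.1, true, st1.2.2) else st1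

def eat_serial_dishes_alt (belt : List Int) (total_dish : Int) (dishes_to_eat : Int) (coupon_num : Int) : Int :=
  (PySem.List.pyRange 0 total_dish 1).foldl (fun best i =>
    let e := i + dishes_to_eat
    let window :=
      if e > total_dish - 1 then
        PySem.List.slice belt (some i) none ++
          PySem.List.slice belt none (some (PySem.Int.mod e total_dish))
      else
        PySem.List.slice belt (some i) (some e)
    let r := (PySem.List.sorted window (fun x => x) false).foldl (scanStep coupon_num) (0, false, none)
    let score := if r.2.1 then r.1 else r.1 + 1
    if score > best then score else best) 0

-- ===== PRECONDITION & SPEC =====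
-- (no Pre_: the Python A returns normally on every input)
def Spec_eat_serial_dishes (belt : List Int) (total_dish : Int) (dishes_to_eat : Int) (coupon_num : Int) (out : Int) : Prop := out = eat_serial_dishes_alt belt total_dish dishes_to_eat coupon_num
instance (belt : List Int) (total_dish : Int) (dishes_to_eat : Int) (coupon_num : Int) (out : Int) : Decidable (Spec_eat_serial_dishes belt total_dish dishes_to_eat coupon_num out) := by unfold Spec_eat_serial_dishes; infer_instance

-- ===== CLAIM (what is proved, stated in full; the proofs are below) =====
def Claim_equal_eat_serial_dishes : Prop := ∀ (belt : List Int) (total_dish : Int) (dishes_to_eat : Int) (coupon_num : Int), Dom_eat_serial_dishes belt total_dish dishes_to_eat coupon_num → Spec_eat_serial_dishes belt total_dish dishes_to_eat coupon_num (eat_serial_dishes belt total_dish dishes_to_eat coupon_num)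

-- ===== LEMMAS AND PROOFS =====

-- len(set(w)) is the Finset cardinality of w's elements
lemma setLen_eq_card (w : List Int) : ((PySem.Set.ofList w).length : Int) = (w.toFinset.card : Int) := by
  have h1 : (PySem.Set.ofList w).toFinset = w.toFinset := by
    ext x; simp [List.mem_toFinset, PySem.Set.mem_ofList]
  have h2 := List.toFinset_card_of_nodup (PySem.Set.nodup_ofList (xs := w))
  rw [← h1, h2]

-- invariant of the inner scan over the (sorted) remainder s: the processed elements are t,
-- prev is a maximal element p of t, so kinds counts the distinct elements seen so far
lemma scan_go (c : Int) : ∀ (s t : List Int) (p : Int) (hasb : Bool),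
    (p :: s).Pairwise (· ≤ ·) → (∀ z ∈ t, z ≤ p) → p ∈ t →
    (s.foldl (scanStep c) ((t.toFinset.card : Int), hasb, some p)).1
        = ((t ++ s).toFinset.card : Int) ∧
      (s.foldl (scanStep c) ((t.toFinset.card : Int), hasb, some p)).2.1
        = (hasb || decide (c ∈ s)) := by
  intro s
  induction s with
  | nil => intro t p hasb _ _ _; simp
  | cons x s' ih =>
    intro t p hasb hch hle hp
    rw [List.pairwise_cons] at hch
    obtain ⟨hpall, hxch⟩ := hch
    have hpx : p ≤ x := hpall x (by simp)
    have hcard : t.toFinset.card ≠ 0 :=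
      Finset.card_ne_zero_of_mem (List.mem_toFinset.mpr hp)
    by_cases hxp : x = p
    · subst hxp
      have hstep : scanStep c ((t.toFinset.card : Int), hasb, some x) x
          = ((t.toFinset.card : Int), (hasb || decide (x = c)), some x) := by
        have hne : ¬(((t.toFinset.card : Int), hasb, some x).1 = 0
            ∨ some x ≠ ((t.toFinset.card : Int), hasb, some x).2.2) := by
          simp [hcard]
        simp only [scanStep]
        rw [if_neg hne]
        by_cases hxc : x = c <;> simp [hxc]
      have hcards : ((t ++ [x]).toFinset.card : Int) = (t.toFinset.card : Int) := by
        have : (t ++ [x]).toFinset = t.toFinset := by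
          simp [List.toFinset_append, Finset.insert_eq_self.mpr (List.mem_toFinset.mpr hp)]
        rw [this]
      have := ih (t ++ [x]) x (hasb || decide (x = c)) hxch
        (fun z hz => by rcases List.mem_append.mp hz with h | h
                        · exact hle z h
                        · simp_all)
        (by simp)
      rw [hcards] at this
      rw [List.foldl_cons, hstep]
      refine ⟨?_, ?_⟩
      · rw [this.1]; congr 1; simp
      · rw [this.2]
        by_cases hxc : c = x <;> by_cases hcs : c ∈ s' <;> simp [hxc, hcs, eq_comm]
    · have hxt : x ∉ t := fun hmem => hxp (le_antisymm (hle x hmem) hpx)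
      have hstep : scanStep c ((t.toFinset.card : Int), hasb, some p) x
          = (((t.toFinset.card : Int) + 1), (hasb || decide (x = c)), some x) := by
        have hpos : (((t.toFinset.card : Int), hasb, some p).1 = 0
            ∨ some x ≠ ((t.toFinset.card : Int), hasb, some p).2.2) := Or.inr (by simp [hxp])
        simp only [scanStep]
        rw [if_pos hpos]
        by_cases hxc : x = c <;> simp [hxc]
      have hcards : ((t ++ [x]).toFinset.card : Int) = (t.toFinset.card : Int) + 1 := by
        have : (t ++ [x]).toFinset = insert x t.toFinset := by simp [List.toFinset_append]
        rw [this, Finset.card_insert_of_notMem (by simp [hxt])]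
        push_cast; ring
      have := ih (t ++ [x]) x (hasb || decide (x = c)) hxch
        (fun z hz => by rcases List.mem_append.mp hz with h | h
                        · exact le_trans (hle z h) hpx
                        · simp_all)
        (by simp)
      rw [hcards] at this
      rw [List.foldl_cons, hstep]
      refine ⟨?_, ?_⟩
      · rw [this.1]; congr 1; simp
      · rw [this.2]
        by_cases hxc : c = x <;> by_cases hcs : c ∈ s' <;> simp [hxc, hcs, eq_comm]

-- the inner scan over the sorted window computes A's per-window score
lemma scan_window (c : Int) (w : List Int) :
    (if ((PySem.List.sorted w (fun x => x) false).foldl (scanStep c) (0, false, none)).2.1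
      then ((PySem.List.sorted w (fun x => x) false).foldl (scanStep c) (0, false, none)).1
      else ((PySem.List.sorted w (fun x => x) false).foldl (scanStep c) (0, false, none)).1 + 1)
      = count_unique_dish w c := by
  have hperm := PySem.List.sorted_perm w (fun x => x) false
  have hpair := PySem.List.sorted_pairwise w (fun x => x)
  cases hs : PySem.List.sorted w (fun x => x) false with
  | nil =>
    have hw : w = [] := by rw [hs] at hperm; exact (List.Perm.nil_eq hperm).symm
    subst hw
    simp [count_unique_dish, PySem.Set.ofList]
  | cons x s' =>
    rw [hs] at hperm
    rw [hs] at hpair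
    rw [List.foldl_cons]
    have hstep1 : scanStep c ((0 : Int), false, (none : Option Int)) x
        = ((([x] : List Int).toFinset.card : Int), decide (x = c), some x) := by
      simp only [scanStep]
      by_cases hxc : x = c <;> simp [hxc]
    rw [hstep1]
    have hgo := scan_go c s' [x] x (decide (x = c)) hpair (by simp) (by simp)
    rw [hgo.1, hgo.2]
    have hcards : ((([x] : List Int) ++ s').toFinset.card : Int) = (w.toFinset.card : Int) := by
      rw [List.singleton_append, List.toFinset_eq_of_perm _ _ hperm]
    have hmem : c ∈ w ↔ (x = c ∨ c ∈ s') := by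
      rw [← hperm.mem_iff, List.mem_cons, eq_comm]
    simp only [count_unique_dish, setLen_eq_card, hcards]
    by_cases hcw : c ∈ w <;> simp_all

-- ===== VERDICT (by name: the statement is the Claim_ definition above) =====
theorem eat_serial_dishes_spec : Claim_equal_eat_serial_dishes := by
  intro belt total_dish dishes_to_eat coupon_num _
  unfold Spec_eat_serial_dishes eat_serial_dishes eat_serial_dishes_alt
  apply PySem.List.foldl_congr_mem
  intro acc i _
  simp only [scan_window]
  split <;> omega
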